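-- pv_equiv track=rewrite | github.com/cedric-dem/ganalyzer | model_creator/run_UI_server.py | get_closest_model_loaded_index
-- ===== SOURCE A (Python) =====
-- def get_closest_model_loaded_index(model_index, models_list):
-- 	models_quantity = len(models_list)
-- 	if 0 <= model_index < models_quantity and models_list[model_index]:
-- 		return model_index
--
-- 	lower = model_index - 1
-- 	upper = model_index + 1
-- 	while lower >= 0 or upper < models_quantity:
-- 		if lower >= 0 and models_list[lower]:
-- 			return lower
-- 		if upper < models_quantity and models_list[upper]:
-- 			return upper
-- 		lower -= 1
-- 		upper += 1
--
-- 	raise ValueError("No models available in the provided list.")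
-- ===== SOURCE B (Python) =====
-- def get_closest_model_loaded_index(model_index, models_list):
-- 	candidates = [i for i, v in enumerate(models_list) if v]
-- 	if not candidates:
-- 		raise ValueError("No models available in the provided list.")
-- 	return min(candidates, key=lambda i: (abs(i - model_index), i))
-- ===== Notes on version B (the rewrite author's own statement) =====
-- stated objective: simpler
-- what changed: Replaces the two-pointer outward scan (with its early exits and wraparound indexing) by collecting all loaded indices in one comprehension and taking the minimum under the compound key (distance, index), which reproduces the lower-index tie-break.
-- intended difference: For negative model_index with a loaded model in the last -model_index-1 positions, A's upper pointer is a negative Python index that wraps around and A returns that NEGATIVE index (e.g. -1), while B returns the actual nonnegative index of the nearest loaded model, which is the intended value for an index-returning function. — e.g. on get_closest_model_loaded_index(-2, [false, false, true]): A returns -1, B returns 2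
import Mathlib
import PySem

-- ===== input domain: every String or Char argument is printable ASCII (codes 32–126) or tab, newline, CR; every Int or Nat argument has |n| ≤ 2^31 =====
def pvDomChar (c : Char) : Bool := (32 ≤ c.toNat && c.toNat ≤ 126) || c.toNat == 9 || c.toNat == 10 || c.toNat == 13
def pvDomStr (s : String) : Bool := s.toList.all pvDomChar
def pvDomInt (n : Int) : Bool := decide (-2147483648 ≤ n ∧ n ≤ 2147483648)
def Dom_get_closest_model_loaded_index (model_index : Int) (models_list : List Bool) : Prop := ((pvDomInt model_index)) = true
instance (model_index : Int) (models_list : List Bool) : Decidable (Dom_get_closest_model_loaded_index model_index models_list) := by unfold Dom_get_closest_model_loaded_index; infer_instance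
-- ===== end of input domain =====

-- B replaces A's two-pointer outward scan by collect-all-loaded-indices then argmin under the
-- key (distance, index): simpler, same O(n) cost; return-value equivalence outside D_ is proved below.

-- ===== PORT A =====
-- A's while-loop: state (lower, upper); the fuel counter starts at the loop measure, which bounds
-- the number of iterations (the loop condition fails once the measure is 0, so fuel never runs out
-- early and the fuel-0 value 0 coincides with the ValueError exit); the port returns 0 on A's raise
-- paths (all excluded by Pre_).
def pvALoop (ml : List Bool) (n : Int) (fuel : Nat) (lower upper : Int) : Int :=
  match fuel with
  | 0 => 0                                     -- loop condition is false here: raise ValueError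
  | fuel + 1 =>
    if 0 ≤ lower ∨ upper < n then
      if 0 ≤ lower ∧ PySem.List.pyGetD ml lower false = true then lower
      else if 0 ≤ lower ∧ n ≤ lower then 0      -- models_list[lower] raises IndexError here
      else if upper < n ∧ PySem.List.pyGetD ml upper false = true then upper
      else if upper < n ∧ upper < -n then 0     -- models_list[upper] raises IndexError here
      else pvALoop ml n fuel (lower - 1) (upper + 1)
    else 0                                      -- raise ValueError

def get_closest_model_loaded_index (model_index : Int) (models_list : List Bool) : Int :=
  let models_quantity : Int := models_list.length
  if 0 ≤ model_index ∧ model_index < models_quantity ∧ PySem.List.pyGetD models_list model_index false = true then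
    model_index
  else
    pvALoop models_list models_quantity
      ((model_index - 1 + 1).toNat + (models_quantity - (model_index + 1)).toNat)
      (model_index - 1) (model_index + 1)

-- ===== PORT B =====
def get_closest_model_loaded_index_alt (model_index : Int) (models_list : List Bool) : Int :=
  let candidates : List Int :=
    (PySem.List.enumerate models_list).filterMap (fun p => if p.2 then some p.1 else none)
  match PySem.List.min2? candidates (fun i => (i - model_index).natAbs) (fun i => i) with
  | none => 0                                  -- no candidates: raise ValueError
  | some r => r

-- ===== PRECONDITION & SPEC =====
-- Pre_ excludes exactly the inputs on which A raises: model_index beyond len+1 in either direction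
-- (IndexError from an out-of-range pointer probe) and lists with no True (ValueError).
def Pre_get_closest_model_loaded_index (model_index : Int) (models_list : List Bool) : Prop :=
  -((models_list.length : Int) + 1) ≤ model_index ∧ model_index ≤ (models_list.length : Int) ∧ true ∈ models_list
instance (model_index : Int) (models_list : List Bool) : Decidable (Pre_get_closest_model_loaded_index model_index models_list) := by unfold Pre_get_closest_model_loaded_index; infer_instance
def pvWitness_get_closest_model_loaded_index : Int × List Bool := (1, [true, false])

-- On negative model_index whose wrap window [len+model_index+1, len) holds a loaded model, A's negative
-- upper pointer wraps around and A returns that NEGATIVE index, while B returns the actual nonnegative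
-- nearest loaded index — the intended value for an index-returning function.
def D_get_closest_model_loaded_index (model_index : Int) (models_list : List Bool) : Prop :=
  model_index < 0 ∧ true ∈ models_list.drop ((models_list.length : Int) + model_index + 1).toNat
instance (model_index : Int) (models_list : List Bool) : Decidable (D_get_closest_model_loaded_index model_index models_list) := by unfold D_get_closest_model_loaded_index; infer_instance

def Spec_get_closest_model_loaded_index (model_index : Int) (models_list : List Bool) (out : Int) : Prop := ¬ D_get_closest_model_loaded_index model_index models_list → out = get_closest_model_loaded_index_alt model_index models_list
instance (model_index : Int) (models_list : List Bool) (out : Int) : Decidable (Spec_get_closest_model_loaded_index model_index models_list out) := by unfold Spec_get_closest_model_loaded_index; infer_instance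

def pvDiffWitness_get_closest_model_loaded_index : Int × List Bool := (-2, [false, false, true])
def pvDiffWitnessOut_get_closest_model_loaded_index : Int × Int := (-1, 2)

-- ===== CLAIM (what is proved, stated in full; the proofs are below) =====
def Claim_unchanged_get_closest_model_loaded_index : Prop := ∀ (model_index : Int) (models_list : List Bool), Dom_get_closest_model_loaded_index model_index models_list → Pre_get_closest_model_loaded_index model_index models_list → Spec_get_closest_model_loaded_index model_index models_list (get_closest_model_loaded_index model_index models_list)
def Claim_changed_get_closest_model_loaded_index : Prop := Dom_get_closest_model_loaded_index (pvDiffWitness_get_closest_model_loaded_index.1) (pvDiffWitness_get_closest_model_loaded_index.2) ∧ Pre_get_closest_model_loaded_index (pvDiffWitness_get_closest_model_loaded_index.1) (pvDiffWitness_get_closest_model_loaded_index.2) ∧ D_get_closest_model_loaded_index (pvDiffWitness_get_closest_model_loaded_index.1) (pvDiffWitness_get_closest_model_loaded_index.2) ∧ get_closest_model_loaded_index (pvDiffWitness_get_closest_model_loaded_index.1) (pvDiffWitness_get_closest_model_loaded_index.2) = pvDiffWitnessOut_get_closest_model_loaded_index.1 ∧ get_closest_model_loaded_index_alt (pvDiffWitness_get_closest_model_loaded_index.1)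 (pvDiffWitness_get_closest_model_loaded_index.2) = pvDiffWitnessOut_get_closest_model_loaded_index.2 ∧ pvDiffWitnessOut_get_closest_model_loaded_index.1 ≠ pvDiffWitnessOut_get_closest_model_loaded_index.2
def Claim_exact_get_closest_model_loaded_index : Prop := ∀ (model_index : Int) (models_list : List Bool), Dom_get_closest_model_loaded_index model_index models_list → Pre_get_closest_model_loaded_index model_index models_list → D_get_closest_model_loaded_index model_index models_list → get_closest_model_loaded_index model_index models_list ≠ get_closest_model_loaded_index_alt model_index models_list

-- ===== LEMMAS AND PROOFS =====

-- "index j is in range and loaded"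
def pvT (ml : List Bool) (j : Int) : Prop :=
  0 ≤ j ∧ j < (ml.length : Int) ∧ PySem.List.pyGetD ml j false = true

-- strict order on B's compound key (abs(i-m), i)
def pvLt (m i j : Int) : Prop :=
  (i - m).natAbs < (j - m).natAbs ∨ ((i - m).natAbs = (j - m).natAbs ∧ i < j)

theorem pv_mem_cand (ml : List Bool) (i : Int) :
    i ∈ (PySem.List.enumerate ml).filterMap (fun p => if p.2 then some p.1 else none) ↔ pvT ml i := by
  rw [PySem.List.enumerate_eq_map_pyRange ml false]
  simp only [List.filterMap_map, List.mem_filterMap, Function.comp]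
  constructor
  · rintro ⟨j, hj, hfj⟩
    rw [PySem.List.mem_pyRange_one] at hj
    split at hfj
    · rename_i hget
      cases hfj
      exact ⟨hj.1, by simpa using hj.2, hget⟩
    · cases hfj
  · rintro ⟨h0, hn, hget⟩
    refine ⟨i, ?_, ?_⟩
    · rw [PySem.List.mem_pyRange_one]; exact ⟨h0, by simpa using hn⟩
    · simp [hget]

theorem pv_exists_T (ml : List Bool) : true ∈ ml ↔ ∃ j, pvT ml j := by
  rw [List.mem_iff_getElem]
  constructor
  · rintro ⟨k, hk, hval⟩
    refine ⟨(k : Int), by positivity, by exact_mod_cast hk, ?_⟩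
    rw [PySem.List.pyGetD_eq_getElem ml false (by positivity) (by exact_mod_cast hk)]
    simpa using hval
  · rintro ⟨j, h0, hn, hget⟩
    refine ⟨j.toNat, by omega, ?_⟩
    rw [PySem.List.pyGetD_eq_getElem ml false h0 hn] at hget
    simpa using hget

theorem pv_min2_aux (m : Int) (cs : List Int) : ∀ (a : Int),
    ∃ r, PySem.List.min2? (a :: cs) (fun i => (i - m).natAbs) (fun i => i) = some r ∧
      (r = a ∨ r ∈ cs) ∧ (∀ j, (j = a ∨ j ∈ cs) → ¬ pvLt m j r) := by
  induction cs with
  | nil =>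
    intro a
    refine ⟨a, rfl, Or.inl rfl, ?_⟩
    rintro j (rfl | h)
    · simp only [pvLt]; omega
    · cases h
  | cons x cs ih =>
    intro a
    by_cases hP : pvLt m x a
    · have hstep : PySem.List.min2? (a :: x :: cs) (fun i => (i - m).natAbs) (fun i => i) =
          PySem.List.min2? (x :: cs) (fun i => (i - m).natAbs) (fun i => i) := by
        have hb : (decide ((x - m).natAbs < (a - m).natAbs) ||
            !decide ((a - m).natAbs < (x - m).natAbs) && decide (x < a)) = true := by
          simp only [pvLt] at hP
          simp only [Bool.or_eq_true, Bool.and_eq_true, Bool.not_eq_true', decide_eq_true_eq,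
            decide_eq_false_iff_not]
          omega
        simp only [PySem.List.min2?, List.foldl_cons]
        rw [if_pos hb]
      rw [hstep]
      obtain ⟨r, hr, hmem, hmin⟩ := ih x
      refine ⟨r, hr, ?_, ?_⟩
      · rcases hmem with rfl | h
        · exact Or.inr List.mem_cons_self
        · exact Or.inr (List.mem_cons_of_mem _ h)
      · rintro j (rfl | hj)
        · have hxr := hmin x (Or.inl rfl)
          simp only [pvLt] at hxr hP ⊢
          omega
        · rw [List.mem_cons] at hj
          rcases hj with rfl | hj
          · exact hmin j (Or.inl rfl)
          · exact hmin j (Or.inr hj)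
    · have hstep : PySem.List.min2? (a :: x :: cs) (fun i => (i - m).natAbs) (fun i => i) =
          PySem.List.min2? (a :: cs) (fun i => (i - m).natAbs) (fun i => i) := by
        have hb : ¬ ((decide ((x - m).natAbs < (a - m).natAbs) ||
            !decide ((a - m).natAbs < (x - m).natAbs) && decide (x < a)) = true) := by
          simp only [pvLt] at hP
          simp only [Bool.or_eq_true, Bool.and_eq_true, Bool.not_eq_true', decide_eq_true_eq,
            decide_eq_false_iff_not]
          omega
        simp only [PySem.List.min2?, List.foldl_cons]
        rw [if_neg hb]
      rw [hstep]
      obtain ⟨r, hr, hmem, hmin⟩ := ih a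
      refine ⟨r, hr, ?_, ?_⟩
      · rcases hmem with rfl | h
        · exact Or.inl rfl
        · exact Or.inr (List.mem_cons_of_mem _ h)
      · rintro j (rfl | hj)
        · exact hmin j (Or.inl rfl)
        · rw [List.mem_cons] at hj
          rcases hj with rfl | hj
          · have har := hmin a (Or.inl rfl)
            simp only [pvLt] at har hP ⊢
            omega
          · exact hmin j (Or.inr hj)

theorem pv_min2_spec (m : Int) (xs : List Int) (h : xs ≠ []) :
    ∃ r, PySem.List.min2? xs (fun i => (i - m).natAbs) (fun i => i) = some r ∧
      r ∈ xs ∧ ∀ j ∈ xs, ¬ pvLt m j r := by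
  cases xs with
  | nil => exact absurd rfl h
  | cons c cs =>
    obtain ⟨r, hr, hmem, hmin⟩ := pv_min2_aux m cs c
    refine ⟨r, hr, ?_, ?_⟩
    · rcases hmem with rfl | h'
      · exact List.mem_cons_self
      · exact List.mem_cons_of_mem _ h'
    · intro j hj
      rw [List.mem_cons] at hj
      rcases hj with rfl | hj
      · exact hmin _ (Or.inl rfl)
      · exact hmin _ (Or.inr hj)

theorem pv_alt_spec (m : Int) (ml : List Bool) (h : true ∈ ml) :
    pvT ml (get_closest_model_loaded_index_alt m ml) ∧
      ∀ j, pvT ml j → ¬ pvLt m j (get_closest_model_loaded_index_alt m ml) := by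
  obtain ⟨j0, hj0⟩ := (pv_exists_T ml).mp h
  have hne : (PySem.List.enumerate ml).filterMap (fun p => if p.2 then some p.1 else none) ≠ [] :=
    List.ne_nil_of_mem ((pv_mem_cand ml j0).mpr hj0)
  obtain ⟨r, hr, hmem, hmin⟩ := pv_min2_spec m _ hne
  have halt : get_closest_model_loaded_index_alt m ml = r := by
    simp only [get_closest_model_loaded_index_alt, hr]
  rw [halt]
  exact ⟨(pv_mem_cand ml r).mp hmem, fun j hj => hmin j ((pv_mem_cand ml j).mpr hj)⟩

-- negative index wraparound: models_list[u] = models_list[len+u] for -len ≤ u < 0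
theorem pv_wrap (ml : List Bool) (u : Int) (h1 : -(ml.length : Int) ≤ u) (h2 : u < 0) :
    PySem.List.pyGetD ml u false = PySem.List.pyGetD ml ((ml.length : Int) + u) false := by
  have hk : u = -(((-u).toNat : Nat) : Int) := by omega
  rw [hk, PySem.List.pyGetD_neg_natCast ml (-u).toNat false (by omega) (by omega)]
  rw [PySem.List.pyGetD_eq_getElem ml false (by omega) (by omega)]
  have he : ml.length - (-u).toNat = ((ml.length : Int) + -(((-u).toNat : Nat) : Int)).toNat := by omega
  simp only [he]

-- A's loop, start from a nonnegative model_index: returns the key-minimal loaded index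
theorem pv_aloop_inrange (ml : List Bool) (m : Int)
    (hn : 0 ≤ m) (hm : m ≤ (ml.length : Int)) (hex : ∃ j, pvT ml j) :
    ∀ (k : Nat) (l u : Int), (l + 1).toNat + ((ml.length : Int) - u).toNat ≤ k →
    l + u = 2 * m → l < m →
    (∀ j, l < j → j < u → ¬ pvT ml j) →
    pvT ml (pvALoop ml (ml.length : Int) k l u) ∧
      ∀ j, pvT ml j → ¬ pvLt m j (pvALoop ml (ml.length : Int) k l u) := by
  intro k
  induction k with
  | zero =>
    intro l u hk hsum hl hwin
    exfalso
    obtain ⟨j, hj0, hjn, hjg⟩ := hex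
    exact hwin j (by omega) (by omega) ⟨hj0, hjn, hjg⟩
  | succ k ih =>
    intro l u hk hsum hl hwin
    by_cases hc : 0 ≤ l ∨ u < (ml.length : Int)
    · rw [pvALoop, if_pos hc]
      by_cases h1 : 0 ≤ l ∧ PySem.List.pyGetD ml l false = true
      · rw [if_pos h1]
        refine ⟨⟨h1.1, by omega, h1.2⟩, ?_⟩
        intro j hj hlt
        obtain ⟨hj0, hjn, hjg⟩ := hj
        by_cases hjw : l < j ∧ j < u
        · exact hwin j hjw.1 hjw.2 ⟨hj0, hjn, hjg⟩
        · simp only [pvLt] at hlt; omega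
      · rw [if_neg h1]
        rw [if_neg (show ¬ (0 ≤ l ∧ (ml.length : Int) ≤ l) by omega)]
        by_cases h3 : u < (ml.length : Int) ∧ PySem.List.pyGetD ml u false = true
        · rw [if_pos h3]
          refine ⟨⟨by omega, h3.1, h3.2⟩, ?_⟩
          intro j hj hlt
          obtain ⟨hj0, hjn, hjg⟩ := hj
          by_cases hjw : l < j ∧ j < u
          · exact hwin j hjw.1 hjw.2 ⟨hj0, hjn, hjg⟩
          · by_cases hjl : j = l
            · subst hjl; exact h1 ⟨hj0, hjg⟩
            · simp only [pvLt] at hlt; omega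
        · rw [if_neg h3]
          rw [if_neg (show ¬ (u < (ml.length : Int) ∧ u < -(ml.length : Int)) by omega)]
          apply ih (l - 1) (u + 1) (by omega) (by omega) (by omega)
          intro j hj1 hj2 hT
          by_cases hjw : l < j ∧ j < u
          · exact hwin j hjw.1 hjw.2 hT
          · obtain ⟨hj0, hjn, hjg⟩ := hT
            by_cases hjl : j = l
            · subst hjl; exact h1 ⟨hj0, hjg⟩
            · have hju : j = u := by omega
              subst hju; exact h3 ⟨hjn, hjg⟩
    · exfalso
      obtain ⟨j, hj0, hjn, hjg⟩ := hex
      exact hwin j (by omega) (by omega) ⟨hj0, hjn, hjg⟩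

-- A's loop, negative model_index, no loaded model in the wrap window: returns the key-minimal loaded index
theorem pv_aloop_neg (ml : List Bool) (m : Int)
    (_hm0 : m ≤ -1) (hmn : -(ml.length : Int) - 1 ≤ m)
    (hwrap : ∀ j, (ml.length : Int) + m + 1 ≤ j → j < (ml.length : Int) →
      PySem.List.pyGetD ml j false ≠ true)
    (hex : ∃ j, pvT ml j) :
    ∀ (k : Nat) (l u : Int), (l + 1).toNat + ((ml.length : Int) - u).toNat ≤ k →
    l < 0 → m + 1 ≤ u →
    (∀ j, 0 ≤ j → j < u → ¬ pvT ml j) →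
    pvT ml (pvALoop ml (ml.length : Int) k l u) ∧
      ∀ j, pvT ml j → ¬ pvLt m j (pvALoop ml (ml.length : Int) k l u) := by
  intro k
  induction k with
  | zero =>
    intro l u hk hl hu hwin
    exfalso
    obtain ⟨j, hj0, hjn, hjg⟩ := hex
    exact hwin j hj0 (by omega) ⟨hj0, hjn, hjg⟩
  | succ k ih =>
    intro l u hk hl hu hwin
    by_cases hc : 0 ≤ l ∨ u < (ml.length : Int)
    · rw [pvALoop, if_pos hc]
      rw [if_neg (show ¬ (0 ≤ l ∧ PySem.List.pyGetD ml l false = true)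
        from fun h' => absurd h'.1 (by omega))]
      rw [if_neg (show ¬ (0 ≤ l ∧ (ml.length : Int) ≤ l) by omega)]
      by_cases h3 : u < (ml.length : Int) ∧ PySem.List.pyGetD ml u false = true
      · by_cases hu0 : 0 ≤ u
        · rw [if_pos h3]
          refine ⟨⟨hu0, h3.1, h3.2⟩, ?_⟩
          intro j hj hlt
          obtain ⟨hj0, hjn, hjg⟩ := hj
          by_cases hjw : j < u
          · exact hwin j hj0 hjw ⟨hj0, hjn, hjg⟩
          · simp only [pvLt] at hlt; omega
        · exfalso
          have hw := pv_wrap ml u (by omega) (by omega)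
          exact hwrap ((ml.length : Int) + u) (by omega) (by omega) (hw ▸ h3.2)
      · rw [if_neg h3]
        rw [if_neg (show ¬ (u < (ml.length : Int) ∧ u < -(ml.length : Int)) by omega)]
        apply ih (l - 1) (u + 1) (by omega) (by omega) (by omega)
        intro j hj1 hj2 hT
        by_cases hjw : j < u
        · exact hwin j hj1 hjw hT
        · obtain ⟨hj0, hjn, hjg⟩ := hT
          have hju : j = u := by omega
          subst hju
          exact h3 ⟨hjn, hjg⟩
    · exfalso
      obtain ⟨j, hj0, hjn, hjg⟩ := hex
      exact hwin j hj0 (by omega) ⟨hj0, hjn, hjg⟩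

-- A's loop, negative model_index with a loaded model inside the wrap window: returns a negative index
theorem pv_aloop_wrap (ml : List Bool) :
    ∀ (k : Nat) (l u : Int), (l + 1).toNat + ((ml.length : Int) - u).toNat ≤ k →
    l < 0 → u ≤ -1 → -(ml.length : Int) ≤ u →
    (∃ j, (ml.length : Int) + u ≤ j ∧ j < (ml.length : Int) ∧ PySem.List.pyGetD ml j false = true) →
    pvALoop ml (ml.length : Int) k l u < 0 := by
  intro k
  induction k with
  | zero =>
    intro l u hk hl hu1 hu2 hex
    exfalso
    obtain ⟨j, hj1, hj2, _⟩ := hex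
    omega
  | succ k ih =>
    intro l u hk hl hu1 hu2 hex
    obtain ⟨j, hj1, hj2, hjg⟩ := hex
    have hc : 0 ≤ l ∨ u < (ml.length : Int) := by omega
    rw [pvALoop, if_pos hc]
    rw [if_neg (show ¬ (0 ≤ l ∧ PySem.List.pyGetD ml l false = true)
      from fun h' => absurd h'.1 (by omega))]
    rw [if_neg (show ¬ (0 ≤ l ∧ (ml.length : Int) ≤ l) by omega)]
    by_cases h3 : u < (ml.length : Int) ∧ PySem.List.pyGetD ml u false = true
    · rw [if_pos h3]; omega
    · rw [if_neg h3]
      rw [if_neg (show ¬ (u < (ml.length : Int) ∧ u < -(ml.length : Int)) by omega)]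
      have hgu : PySem.List.pyGetD ml u false ≠ true := fun hg => h3 ⟨by omega, hg⟩
      rw [pv_wrap ml u hu2 (by omega)] at hgu
      have hju : (ml.length : Int) + u ≠ j := fun he => hgu (he ▸ hjg)
      apply ih (l - 1) (u + 1) (by omega) (by omega) (by omega) (by omega)
      exact ⟨j, by omega, hj2, hjg⟩

-- two key-minimal loaded indices are equal
theorem pv_best_unique (ml : List Bool) (m r1 r2 : Int)
    (h1 : pvT ml r1) (h2 : pvT ml r2)
    (hm1 : ∀ j, pvT ml j → ¬ pvLt m j r1) (hm2 : ∀ j, pvT ml j → ¬ pvLt m j r2) : r1 = r2 := by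
  have ha := hm1 r2 h2
  have hb := hm2 r1 h1
  simp only [pvLt] at ha hb
  omega

-- ¬D_ gives: nothing loaded in the wrap window
theorem pv_not_D_wrap (m : Int) (ml : List Bool)
    (hm : -(ml.length : Int) - 1 ≤ m) (hm0 : m < 0)
    (hnd : ¬ D_get_closest_model_loaded_index m ml) :
    ∀ j, (ml.length : Int) + m + 1 ≤ j → j < (ml.length : Int) →
      PySem.List.pyGetD ml j false ≠ true := by
  intro j hj1 hj2 hjg
  apply hnd
  refine ⟨hm0, ?_⟩
  rw [PySem.List.pyGetD_eq_getElem ml false (by omega) hj2] at hjg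
  rw [List.mem_iff_getElem]
  refine ⟨j.toNat - ((ml.length : Int) + m + 1).toNat, ?_, ?_⟩
  · rw [List.length_drop]; omega
  · rw [List.getElem_drop]
    have he : ((ml.length : Int) + m + 1).toNat + (j.toNat - ((ml.length : Int) + m + 1).toNat) = j.toNat := by omega
    simp only [he]
    exact hjg

-- D_ gives: a loaded model inside the wrap window probed by A's upper pointer
theorem pv_D_wrap (m : Int) (ml : List Bool)
    (hm : -(ml.length : Int) - 1 ≤ m)
    (hd : D_get_closest_model_loaded_index m ml) :
    m + 1 ≤ -1 ∧
    ∃ j, (ml.length : Int) + (m + 1) ≤ j ∧ j < (ml.length : Int) ∧ PySem.List.pyGetD ml j false = true := by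
  obtain ⟨hm0, hmem⟩ := hd
  rw [List.mem_iff_getElem] at hmem
  obtain ⟨i, hi, hv⟩ := hmem
  rw [List.length_drop] at hi
  rw [List.getElem_drop] at hv
  set kk := ((ml.length : Int) + m + 1).toNat with hkk
  have hjlt : kk + i < ml.length := by omega
  have hkknn : (kk : Int) = (ml.length : Int) + m + 1 := by omega
  refine ⟨by omega, ((kk + i : Nat) : Int), by push_cast; omega, by push_cast; omega, ?_⟩
  rw [PySem.List.pyGetD_eq_getElem ml false (by positivity) (by exact_mod_cast hjlt)]
  simpa using hv

theorem pv_entry_best (m : Int) (ml : List Bool)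
    (hent : 0 ≤ m ∧ m < (ml.length : Int) ∧ PySem.List.pyGetD ml m false = true) :
    pvT ml m ∧ ∀ j, pvT ml j → ¬ pvLt m j m := by
  refine ⟨hent, ?_⟩
  intro j _ hlt
  simp only [pvLt] at hlt
  omega

-- ===== VERDICT (by name: the statement is the Claim_ definition above) =====
theorem get_closest_model_loaded_index_spec : Claim_unchanged_get_closest_model_loaded_index := by
  unfold Claim_unchanged_get_closest_model_loaded_index Spec_get_closest_model_loaded_index
  intro m ml _ hpre hnd
  obtain ⟨hlo, hhi, hmem⟩ := hpre
  have hexT := (pv_exists_T ml).mp hmem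
  obtain ⟨hTb, hminb⟩ := pv_alt_spec m ml hmem
  simp only [get_closest_model_loaded_index]
  by_cases hent : 0 ≤ m ∧ m < (ml.length : Int) ∧ PySem.List.pyGetD ml m false = true
  · rw [if_pos hent]
    obtain ⟨hTm, hminm⟩ := pv_entry_best m ml hent
    exact pv_best_unique ml m m _ hTm hTb hminm hminb
  · rw [if_neg hent]
    by_cases hm0 : 0 ≤ m
    · obtain ⟨hTa, hmina⟩ := pv_aloop_inrange ml m hm0 hhi hexT
        ((m - 1 + 1).toNat + ((ml.length : Int) - (m + 1)).toNat) (m - 1) (m + 1)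
        le_rfl (by ring) (by omega)
        (by
          intro j hj1 hj2 hT
          have hjm : j = m := by omega
          subst hjm
          exact hent ⟨hT.1, hT.2.1, hT.2.2⟩)
      exact pv_best_unique ml m _ _ hTa hTb hmina hminb
    · have hwrap := pv_not_D_wrap m ml (by omega) (by omega) hnd
      obtain ⟨hTa, hmina⟩ := pv_aloop_neg ml m (by omega) (by omega) hwrap hexT
        ((m - 1 + 1).toNat + ((ml.length : Int) - (m + 1)).toNat) (m - 1) (m + 1)
        le_rfl (by omega) (by omega)
        (by intro j hj1 hj2; omega)
      exact pv_best_unique ml m _ _ hTa hTb hmina hminb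

theorem get_closest_model_loaded_index_changed : Claim_changed_get_closest_model_loaded_index := by
  unfold Claim_changed_get_closest_model_loaded_index pvDiffWitness_get_closest_model_loaded_index
    pvDiffWitnessOut_get_closest_model_loaded_index
  decide

theorem get_closest_model_loaded_index_tight : Claim_exact_get_closest_model_loaded_index := by
  unfold Claim_exact_get_closest_model_loaded_index
  intro m ml _ hpre hd
  obtain ⟨hlo, hhi, hmem⟩ := hpre
  obtain ⟨hu1, hexw⟩ := pv_D_wrap m ml (by omega) hd
  have hm0 : ¬ (0 ≤ m) := by omega
  have hA : get_closest_model_loaded_index m ml < 0 := by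
    simp only [get_closest_model_loaded_index]
    rw [if_neg (fun h => hm0 h.1)]
    exact pv_aloop_wrap ml ((m - 1 + 1).toNat + ((ml.length : Int) - (m + 1)).toNat)
      (m - 1) (m + 1) le_rfl (by omega) hu1 (by omega) hexw
  have hB : 0 ≤ get_closest_model_loaded_index_alt m ml := (pv_alt_spec m ml hmem).1.1
  omega
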